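-- pv_equiv track=rewrite | github.com/abdullahaleem/unsupervised-pattern-mining | util.py | selectSequence
-- ===== SOURCE A (Python) =====
-- import copy
--
-- def supportCount(database, item):
-- # returns the support count of an item in the database
--
-- 	count = 0;
-- 	for sequence in database:
-- 		for itemset in sequence:
-- 			for itemsetItem in itemset:
-- 				if itemsetItem == item:
-- 					count = count + 1
-- 					break
-- 			if itemsetItem == item:
-- 				break
-- 	return count
--
-- def selectSequence(database, databaseLength, item, phi):
--
-- 	candidateSeq = []
-- 	origPhi = phi
--
-- 	for i in range(len(database)):
-- 		for j in range(len(database[i])):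
-- 			if item in database[i][j]:
-- 				candidateSeq.append(database[i])
-- 				break
--
-- 	remove = []
-- 	for seq in candidateSeq:
-- 		for itemSetJ in seq:
-- 			for itemJ in itemSetJ:
-- 				sc_ik = supportCount(database, item)
-- 				sc_ij = supportCount(database, itemJ)
-- 				if itemJ != item and abs(sc_ik - sc_ij) > phi and itemJ not in remove:
-- 					remove.append(itemJ)
--
-- 	candidateSeq_Copy = copy.deepcopy(candidateSeq)
--
-- 	for seq in candidateSeq_Copy[:]:
-- 		for itemSetJ in seq[:]:
-- 			for itemJ in itemSetJ[:]:
-- 				if itemJ in remove: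
-- 					if len(itemSetJ) == 1:
-- 						if len(seq) == 1:
-- 							candidateSeq_Copy.remove(seq)
-- 						else:
-- 							seq.remove(itemSetJ)
-- 					else:
-- 						itemSetJ.remove(itemJ)
--
-- 	return candidateSeq_Copy
-- ===== SOURCE B (Python) =====
-- def supportCount(database, item):
--     # number of sequences in which the item occurs
--     return sum(1 for seq in database if any(item in its for its in seq))
--
-- def selectSequence(database, databaseLength, item, phi):
--     candidateSeq = [seq for seq in database if any(item in its for its in seq)]
--
--     sc_ik = supportCount(database, item)
--     remove = []
--     for seq in candidateSeq:
--         for itemSetJ in seq: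
--             for itemJ in itemSetJ:
--                 if itemJ != item and abs(sc_ik - supportCount(database, itemJ)) > phi and itemJ not in remove:
--                     remove.append(itemJ)
--
--     result = []
--     for seq in candidateSeq:
--         newSeq = []
--         for itemSetJ in seq:
--             newItemSet = [x for x in itemSetJ if x not in remove]
--             if newItemSet:
--                 newSeq.append(newItemSet)
--         if newSeq:
--             result.append(newSeq)
--     return result
-- ===== Notes on version B (the rewrite author's own statement) =====
-- stated objective: simpler
-- what changed: supportCount becomes a one-line count of sequences containing the item instead of triple loops with breaks and a leftover loop variable, and the pruning phase builds a fresh result by constructive filtering (keep items not in remove, keep non-empty itemsets, keep non-empty sequences) instead of deep-copying and destructively pruning with in-place .remove and live length checks.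
-- outside the precondition, e.g. on selectSequence([[[1], []]], 1, 1, 0): A returns [[[1], []]], B returns [[[1]]]; on selectSequence([[[], [1]]], 1, 1, 0): A raises UnboundLocalError, B returns [[[1]]]
import Mathlib
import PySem

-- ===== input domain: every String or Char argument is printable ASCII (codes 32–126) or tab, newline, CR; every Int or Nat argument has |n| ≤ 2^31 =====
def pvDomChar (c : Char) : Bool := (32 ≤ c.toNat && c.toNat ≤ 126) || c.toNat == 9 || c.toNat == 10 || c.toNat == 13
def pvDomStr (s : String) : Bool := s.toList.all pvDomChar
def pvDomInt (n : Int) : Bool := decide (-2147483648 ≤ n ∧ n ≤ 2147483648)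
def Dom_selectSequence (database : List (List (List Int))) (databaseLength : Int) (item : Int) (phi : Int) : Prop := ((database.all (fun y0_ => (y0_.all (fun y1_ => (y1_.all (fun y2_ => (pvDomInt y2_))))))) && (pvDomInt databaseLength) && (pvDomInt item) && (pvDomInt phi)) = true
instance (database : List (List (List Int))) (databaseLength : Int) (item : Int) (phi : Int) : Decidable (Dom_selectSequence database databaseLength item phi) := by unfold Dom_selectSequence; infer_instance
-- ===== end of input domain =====

-- B simplifies A: supportCount becomes a one-line count of sequences containing the item, and the
-- pruning phase rebuilds a fresh result by constructive filtering instead of deepcopy + in-place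
-- .remove with live length checks (objective: simpler).

-- ===== PORT A =====
-- supportCount, inner loop 'for itemsetItem in itemset' (break at first match; threads the last
-- value of the loop variable, which Python leaks across itemsets/sequences)
def scInner (item : Int) : List Int → Int → Option Int → Int × Option Int
  | [], c, last => (c, last)
  | x :: rest, c, last =>
    if x = item then (c + 1, some x)
    else scInner item rest c (some x)

-- loop 'for itemset in sequence' with the post-loop 'if itemsetItem == item: break' check.
-- 'none' (loop variable never assigned: first itemset of the first sequence empty) is where
-- Python raises UnboundLocalError; here none ≠ some item, i.e. no break — outside Pre_.
def scItemsets (item : Int) : List (List Int) → Int → Option Int → Int × Option Int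
  | [], c, last => (c, last)
  | its :: rest, c, last =>
    let r := scInner item its c last
    if r.2 = some item then r
    else scItemsets item rest r.1 r.2

def supportCountA (database : List (List (List Int))) (item : Int) : Int :=
  (database.foldl (fun st seq => scItemsets item seq st.1 st.2) ((0 : Int), (none : Option Int))).1

-- 'for j in range(len(database[i])): if item in database[i][j]: append; break'
def hasItemA (item : Int) : List (List Int) → Bool
  | [] => false
  | its :: rest => if its.contains item then true else hasItemA item rest

def candA (database : List (List (List Int))) (item : Int) : List (List (List Int)) :=
  database.foldl (fun acc seq => if hasItemA item seq then acc ++ [seq] else acc) []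

-- the 'remove' accumulation loop (sc_ik recomputed inside the innermost loop, as in A)
def removeA (database : List (List (List Int))) (item : Int) (phi : Int)
    (cand : List (List (List Int))) : List Int :=
  cand.foldl (fun rem seq =>
    seq.foldl (fun rem its =>
      its.foldl (fun rem j =>
        let sc_ik := supportCountA database item
        let sc_ij := supportCountA database j
        if j ≠ item ∧ phi < |sc_ik - sc_ij| ∧ rem.contains j = false then rem ++ [j]
        else rem) rem) rem) []

-- destructive pruning pass. Python mutates objects in place and removes by first value-equality
-- ('list.remove'); this pure model tracks each live container and applies 'remove'/mutation at the
-- first value-equal position (List.erase / List.replace), which coincides with Python's object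
-- identity on every input admitted by Pre_.
-- 'for itemJ in itemSetJ[:]': snapshot of the itemset vs its live value
def pruneItems (rem : List Int) : List Int → List Int → List Int × Bool
  | [], live => (live, false)
  | j :: snap, live =>
    if rem.contains j then
      if live.length = 1 then (live, true)   -- escalate to seq level (snapshot is exhausted here)
      else pruneItems rem snap (live.erase j)
    else pruneItems rem snap live

-- 'for itemSetJ in seq[:]'
def pruneSeq (rem : List Int) : List (List Int) → List (List Int) → List (List Int) × Bool
  | [], live => (live, false)
  | its :: snap, live =>
    let r := pruneItems rem its its
    let live' := live.replace its r.1
    if r.2 then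
      if live'.length = 1 then (live', true)  -- escalate to candidateSeq_Copy level
      else pruneSeq rem snap (live'.erase r.1)
    else pruneSeq rem snap live'

-- 'for seq in candidateSeq_Copy[:]'
def pruneCs (rem : List Int) : List (List (List Int)) → List (List (List Int)) → List (List (List Int))
  | [], live => live
  | seq :: snap, live =>
    let r := pruneSeq rem seq seq
    if r.2 then pruneCs rem snap (live.erase r.1)
    else pruneCs rem snap (live.replace seq r.1)

def selectSequence (database : List (List (List Int))) (databaseLength : Int) (item : Int) (phi : Int) : List (List (List Int)) :=
  let candidateSeq := candA database item
  let rem := removeA database item phi candidateSeq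
  pruneCs rem candidateSeq candidateSeq

-- ===== PORT B =====
-- sum(1 for seq in database if any(item in its for its in seq))
def supportCountB (database : List (List (List Int))) (item : Int) : Int :=
  database.foldl (fun c seq => if seq.any (fun its => its.contains item) then c + 1 else c) 0

def candB (database : List (List (List Int))) (item : Int) : List (List (List Int)) :=
  database.filter (fun seq => seq.any (fun its => its.contains item))

def removeB (database : List (List (List Int))) (item : Int) (phi : Int)
    (cand : List (List (List Int))) : List Int :=
  let sc_ik := supportCountB database item
  cand.foldl (fun rem seq =>
    seq.foldl (fun rem its =>
      its.foldl (fun rem j =>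
        if j ≠ item ∧ phi < |sc_ik - supportCountB database j| ∧ rem.contains j = false then rem ++ [j]
        else rem) rem) rem) []

-- constructive rebuild: keep items not in remove, keep non-empty itemsets, keep non-empty sequences
def rebuildB (rem : List Int) (cand : List (List (List Int))) : List (List (List Int)) :=
  cand.foldl (fun res seq =>
    let newSeq := seq.foldl (fun acc its =>
      let ni := its.filter (fun x => !(rem.contains x))
      if ni.isEmpty then acc else acc ++ [ni]) []
    if newSeq.isEmpty then res else res ++ [newSeq]) []

def selectSequence_alt (database : List (List (List Int))) (databaseLength : Int) (item : Int) (phi : Int) : List (List (List Int)) :=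
  let cand := candB database item
  let rem := removeB database item phi cand
  rebuildB rem cand

-- ===== PRECONDITION & SPEC =====
-- Pre_ excludes databases (unless the item occurs nowhere, where both trivially return []) in which
-- some sequence starts with an empty itemset — there A's supportCount raises UnboundLocalError or
-- silently miscounts via the loop variable leaked from the previous sequence — or in which a
-- sequence containing the item has an empty itemset, which A's deepcopy/remove pass accidentally
-- preserves in its output and B, which filters it out, deliberately does not reproduce.
def Pre_selectSequence (database : List (List (List Int))) (databaseLength : Int) (item : Int) (phi : Int) : Prop :=
  ((∀ seq ∈ database, seq.head? ≠ some []) ∧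
    (∀ seq ∈ database, (∃ its ∈ seq, item ∈ its) → ∀ its ∈ seq, its ≠ [])) ∨
  (∀ seq ∈ database, ∀ its ∈ seq, item ∉ its)
instance (database : List (List (List Int))) (databaseLength : Int) (item : Int) (phi : Int) : Decidable (Pre_selectSequence database databaseLength item phi) := by unfold Pre_selectSequence; infer_instance

def pvWitness_selectSequence : List (List (List Int)) × Int × Int × Int :=
  ([[[1], [2]], [[3]]], 2, 1, 0)

def Spec_selectSequence (database : List (List (List Int))) (databaseLength : Int) (item : Int) (phi : Int) (out : List (List (List Int))) : Prop := out = selectSequence_alt database databaseLength item phi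
instance (database : List (List (List Int))) (databaseLength : Int) (item : Int) (phi : Int) (out : List (List (List Int))) : Decidable (Spec_selectSequence database databaseLength item phi out) := by unfold Spec_selectSequence; infer_instance

-- ===== CLAIM (what is proved, stated in full; the proofs are below) =====
def Claim_equal_selectSequence : Prop := ∀ (database : List (List (List Int))) (databaseLength : Int) (item : Int) (phi : Int), Dom_selectSequence database databaseLength item phi → Pre_selectSequence database databaseLength item phi → Spec_selectSequence database databaseLength item phi (selectSequence database databaseLength item phi)

-- ===== LEMMAS AND PROOFS =====

-- proof-side abbreviations: the filter B applies to one itemset, and to one sequence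
def fI (rem its : List Int) : List Int := its.filter (fun x => !(rem.contains x))

def gS (rem : List Int) (seq : List (List Int)) : List (List Int) :=
  (seq.filter (fun its => !((fI rem its).isEmpty))).map (fI rem)

-- generic facts about List.replace used to model Python's in-place mutation
theorem replace_self {α : Type} [BEq α] [LawfulBEq α] (l : List α) (a : α) :
    l.replace a a = l := by
  induction l with
  | nil => rfl
  | cons c t ih =>
    by_cases h : c = a
    · subst h; simp [List.replace_cons]
    · have hb : (a == c) = false := beq_eq_false_iff_ne.mpr (fun he => h he.symm)
      simp [List.replace_cons, hb, ih]

theorem replace_append_of_not_mem {α : Type} [BEq α] [LawfulBEq α]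
    (l₁ l₂ : List α) (a b : α) (h : a ∉ l₁) :
    (l₁ ++ a :: l₂).replace a b = l₁ ++ b :: l₂ := by
  induction l₁ with
  | nil => simp [List.replace_cons]
  | cons c t ih =>
    have hb : (a == c) = false :=
      beq_eq_false_iff_ne.mpr (fun he => h (he ▸ List.mem_cons_self))
    simp [List.replace_cons, hb, ih (fun hm => h (List.mem_cons_of_mem _ hm))]

-- small facts about fI and gS
theorem fI_nil (rem : List Int) : fI rem [] = [] := rfl

theorem fI_cons_mem (rem : List Int) {j : Int} (rest : List Int) (hj : j ∈ rem) :
    fI rem (j :: rest) = fI rem rest := by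
  simp [fI, List.filter_cons, hj]

theorem fI_cons_notmem (rem : List Int) {j : Int} (rest : List Int) (hj : j ∉ rem) :
    fI rem (j :: rest) = j :: fI rem rest := by
  simp [fI, List.filter_cons, hj]

theorem fI_eq_nil_mem {rem its : List Int} (h : fI rem its = []) :
    ∀ x ∈ its, x ∈ rem := by
  intro x hx
  have := List.filter_eq_nil_iff.mp h x hx
  simpa using this

theorem fI_idem (rem its : List Int) : fI rem (fI rem its) = fI rem its :=
  List.filter_eq_self.mpr fun x hx => (List.mem_filter.mp hx).2

theorem gS_nil (rem : List Int) : gS rem [] = [] := rfl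

theorem gS_cons_drop (rem : List Int) {its : List Int} (rest : List (List Int))
    (h : fI rem its = []) : gS rem (its :: rest) = gS rem rest := by
  simp [gS, List.filter_cons, h]

theorem gS_cons_keep (rem : List Int) {its : List Int} (rest : List (List Int))
    (h : fI rem its ≠ []) : gS rem (its :: rest) = fI rem its :: gS rem rest := by
  have h2 : (fI rem its).isEmpty = false := by simpa [List.isEmpty_iff] using h
  simp [gS, List.filter_cons, h2]

theorem gS_of_all_clean (rem : List Int) :
    ∀ (t : List (List Int)), (∀ its ∈ t, fI rem its = its ∧ its ≠ []) → gS rem t = t := by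
  intro t
  induction t with
  | nil => intro _; rfl
  | cons its rest ih =>
    intro h
    obtain ⟨h1, h2⟩ := h its List.mem_cons_self
    have hne : fI rem its ≠ [] := by rw [h1]; exact h2
    rw [gS_cons_keep rem rest hne, h1, ih (fun i hi => h i (List.mem_cons_of_mem _ hi))]

theorem gS_idem (rem : List Int) (s : List (List Int)) : gS rem (gS rem s) = gS rem s := by
  apply gS_of_all_clean
  intro its' h
  obtain ⟨its, hits, rfl⟩ := List.mem_map.mp h
  have hp := (List.mem_filter.mp hits).2
  have hne : fI rem its ≠ [] := by simpa [List.isEmpty_iff] using hp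
  exact ⟨fI_idem rem its, hne⟩

theorem gS_ne_nil (rem : List Int) (item : Int) (s : List (List Int))
    (hitem : item ∉ rem) (hex : ∃ its ∈ s, item ∈ its) :
    gS rem s ≠ [] := by
  obtain ⟨its, hi, hmem⟩ := hex
  have hmemf : item ∈ fI rem its := List.mem_filter.mpr ⟨hmem, by simp [hitem]⟩
  have hne : fI rem its ≠ [] := List.ne_nil_of_mem hmemf
  have hp : (!((fI rem its).isEmpty)) = true := by simpa [List.isEmpty_iff] using hne
  exact List.ne_nil_of_mem (List.mem_map.mpr ⟨its, List.mem_filter.mpr ⟨hi, hp⟩, rfl⟩)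

-- ---- supportCount: A's break-laden triple loop counts sequences containing the item ----

theorem scInner_pos (item : Int) : ∀ (its : List Int) (c : Int) (last : Option Int),
    item ∈ its → scInner item its c last = (c + 1, some item) := by
  intro its
  induction its with
  | nil => intro c last h; simp at h
  | cons x rest ih =>
    intro c last h
    by_cases hx : x = item
    · subst hx; simp [scInner]
    · have hmem : item ∈ rest := by
        rcases List.mem_cons.mp h with he | hm
        · exact absurd he.symm hx
        · exact hm
      simp only [scInner, if_neg hx]
      exact ih c (some x) hmem

theorem scInner_neg (item : Int) : ∀ (its : List Int) (c : Int) (last : Option Int),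
    its ≠ [] → item ∉ its →
    ∃ y, y ∈ its ∧ y ≠ item ∧ scInner item its c last = (c, some y) := by
  intro its
  induction its with
  | nil => intro c last h _; exact absurd rfl h
  | cons x rest ih =>
    intro c last _ h
    have hx : ¬ (x = item) := fun he => h (he ▸ List.mem_cons_self)
    have hrest : item ∉ rest := fun hm => h (List.mem_cons_of_mem _ hm)
    cases rest with
    | nil =>
      refine ⟨x, List.mem_cons_self, fun he => hx he, ?_⟩
      simp only [scInner, if_neg hx]
    | cons z zs =>
      obtain ⟨y, hy, hyne, heq⟩ := ih c (some x) (by simp) hrest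
      refine ⟨y, List.mem_cons_of_mem _ hy, hyne, ?_⟩
      simp only [scInner, if_neg hx]
      exact heq

theorem scItemsets_cons_break {item : Int} {its : List Int} {c c' : Int}
    {last : Option Int} (rest : List (List Int))
    (hr : scInner item its c last = (c', some item)) :
    scItemsets item (its :: rest) c last = (c', some item) := by
  simp [scItemsets, hr]

theorem scItemsets_cons_cont {item y : Int} {its : List Int} {c c' : Int}
    {last : Option Int} (rest : List (List Int))
    (hr : scInner item its c last = (c', some y)) (hy : y ≠ item) :
    scItemsets item (its :: rest) c last = scItemsets item rest c' (some y) := by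
  simp [scItemsets, hr, hy]

-- an empty itemset is only dangerous when the leaked loop variable may equal the item: a
-- nonempty leading itemset (or a known-safe leftover) keeps the count exact
theorem scItemsets_fst (item : Int) : ∀ (seqs : List (List Int)) (c : Int) (last : Option Int),
    (seqs.head? ≠ some [] ∨ last ≠ some item) →
    (scItemsets item seqs c last).1 =
      (if seqs.any (fun its => its.contains item) then c + 1 else c) := by
  intro seqs
  induction seqs with
  | nil => intro c last _; simp [scItemsets]
  | cons its rest ih =>
    intro c last hsafe
    by_cases hits : its = []
    · subst hits
      have hlast : last ≠ some item := by
        rcases hsafe with h | h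
        · simp at h
        · exact h
      have hstep : scItemsets item ([] :: rest) c last = scItemsets item rest c last := by
        simp [scItemsets, scInner, hlast]
      rw [hstep, ih c last (Or.inr hlast)]
      simp [List.any_cons]
    · by_cases hc : item ∈ its
      · rw [scItemsets_cons_break rest (scInner_pos item its c last hc)]
        simp [List.any_cons, hc]
      · obtain ⟨y, hy, hyne, heq⟩ := scInner_neg item its c last hits hc
        rw [scItemsets_cons_cont rest heq hyne,
          ih c (some y) (Or.inr (fun hsome => hyne (Option.some.inj hsome)))]
        simp [List.any_cons, hc]

theorem scA_fold (item : Int) : ∀ (db : List (List (List Int))) (c : Int) (last : Option Int),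
    (∀ seq ∈ db, seq.head? ≠ some []) →
    (db.foldl (fun st seq => scItemsets item seq st.1 st.2) (c, last)).1 =
      db.foldl (fun c seq => if seq.any (fun its => its.contains item) then c + 1 else c) c := by
  intro db
  induction db with
  | nil => intro c last _; rfl
  | cons seq rest ih =>
    intro c last hne
    simp only [List.foldl_cons]
    rcases hr : scItemsets item seq c last with ⟨c', l'⟩
    have hc' : c' = if seq.any (fun its => its.contains item) then c + 1 else c := by
      have h2 := scItemsets_fst item seq c last (Or.inl (hne seq List.mem_cons_self))
      rw [hr] at h2
      exact h2
    rw [ih c' l' (fun s hs => hne s (List.mem_cons_of_mem _ hs)), hc']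

theorem supportCount_eq (db : List (List (List Int)))
    (hne : ∀ seq ∈ db, seq.head? ≠ some []) (x : Int) :
    supportCountA db x = supportCountB db x := by
  unfold supportCountA supportCountB
  exact scA_fold x db 0 none hne

-- ---- candidate selection ----

theorem hasItemA_eq (item : Int) : ∀ (seq : List (List Int)),
    hasItemA item seq = seq.any (fun its => its.contains item) := by
  intro seq
  induction seq with
  | nil => rfl
  | cons its rest ih =>
    by_cases h : item ∈ its
    · simp [hasItemA, List.any_cons, h]
    · simp [hasItemA, List.any_cons, h, ih]

theorem candA_fold (item : Int) : ∀ (db : List (List (List Int))) (acc : List (List (List Int))),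
    db.foldl (fun acc seq => if hasItemA item seq then acc ++ [seq] else acc) acc
      = acc ++ db.filter (fun seq => seq.any (fun its => its.contains item)) := by
  intro db
  induction db with
  | nil => intro acc; simp
  | cons s t ih =>
    intro acc
    simp only [List.foldl_cons, List.filter_cons, hasItemA_eq] at ih ⊢
    cases h : s.any (fun its => its.contains item) with
    | true =>
      rw [if_pos rfl, if_pos rfl, ih (acc ++ [s]), List.append_assoc, List.singleton_append]
    | false =>
      rw [if_neg Bool.false_ne_true, if_neg Bool.false_ne_true, ih acc]

theorem candA_eq (db : List (List (List Int))) (item : Int) :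
    candA db item = candB db item := by
  unfold candA candB
  rw [candA_fold]
  simp

-- ---- the remove list never contains the item itself ----

theorem inv1 (db : List (List (List Int))) (item phi sc : Int) :
    ∀ (its : List Int) (rem : List Int), item ∉ rem →
    item ∉ its.foldl (fun rem j =>
      if j ≠ item ∧ phi < |sc - supportCountB db j| ∧ rem.contains j = false then rem ++ [j]
      else rem) rem := by
  intro its
  induction its with
  | nil => intro rem h; exact h
  | cons j t ih =>
    intro rem h
    simp only [List.foldl_cons]
    split_ifs with hcond
    · refine ih _ ?_
      intro hmem
      rcases List.mem_append.mp hmem with hl | hr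
      · exact h hl
      · exact hcond.1 (List.mem_singleton.mp hr).symm
    · exact ih _ h

theorem inv2 (db : List (List (List Int))) (item phi sc : Int) :
    ∀ (seq : List (List Int)) (rem : List Int), item ∉ rem →
    item ∉ seq.foldl (fun rem its =>
      its.foldl (fun rem j =>
        if j ≠ item ∧ phi < |sc - supportCountB db j| ∧ rem.contains j = false then rem ++ [j]
        else rem) rem) rem := by
  intro seq
  induction seq with
  | nil => intro rem h; exact h
  | cons its t ih =>
    intro rem h
    exact ih _ (inv1 db item phi sc its rem h)

theorem inv3 (db : List (List (List Int))) (item phi sc : Int) :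
    ∀ (cand : List (List (List Int))) (rem : List Int), item ∉ rem →
    item ∉ cand.foldl (fun rem seq =>
      seq.foldl (fun rem its =>
        its.foldl (fun rem j =>
          if j ≠ item ∧ phi < |sc - supportCountB db j| ∧ rem.contains j = false then rem ++ [j]
          else rem) rem) rem) rem := by
  intro cand
  induction cand with
  | nil => intro rem h; exact h
  | cons s t ih =>
    intro rem h
    exact ih _ (inv2 db item phi sc s rem h)

theorem removeB_not_mem (db : List (List (List Int))) (item phi : Int)
    (cand : List (List (List Int))) :
    item ∉ removeB db item phi cand :=
  inv3 db item phi (supportCountB db item) cand [] (by simp)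

-- ---- step lemmas for A's destructive pruning pass ----

theorem pruneItems_cons_esc {rem : List Int} {j : Int} (snap live : List Int)
    (hj : j ∈ rem) (hlen : live.length = 1) :
    pruneItems rem (j :: snap) live = (live, true) := by
  simp [pruneItems, hj, hlen]

theorem pruneItems_cons_mem {rem : List Int} {j : Int} (snap live : List Int)
    (hj : j ∈ rem) (hlen : live.length ≠ 1) :
    pruneItems rem (j :: snap) live = pruneItems rem snap (live.erase j) := by
  simp [pruneItems, hj, hlen]

theorem pruneItems_cons_notmem {rem : List Int} {j : Int} (snap live : List Int)
    (hj : j ∉ rem) :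
    pruneItems rem (j :: snap) live = pruneItems rem snap live := by
  simp [pruneItems, hj]

theorem pruneSeq_cons_keep {rem : List Int} {its its' : List Int}
    (snap live : List (List Int)) (hr : pruneItems rem its its = (its', false)) :
    pruneSeq rem (its :: snap) live = pruneSeq rem snap (live.replace its its') := by
  simp [pruneSeq, hr]

theorem pruneSeq_cons_esc {rem : List Int} {its its' : List Int}
    (snap live : List (List Int)) (hr : pruneItems rem its its = (its', true))
    (hlen : live.length ≠ 1) :
    pruneSeq rem (its :: snap) live
      = pruneSeq rem snap ((live.replace its its').erase its') := by
  simp [pruneSeq, hr, hlen]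

theorem pruneCs_cons_keep {rem : List Int} {s s' : List (List Int)}
    (snap live : List (List (List Int))) (hr : pruneSeq rem s s = (s', false)) :
    pruneCs rem (s :: snap) live = pruneCs rem snap (live.replace s s') := by
  simp [pruneCs, hr]

-- ---- A's pruning equals B's constructive filter ----

theorem pruneItems_esc (rem : List Int) : ∀ (snap : List Int),
    snap ≠ [] → fI rem snap = [] →
    ∃ x, x ∈ rem ∧ pruneItems rem snap snap = ([x], true) := by
  intro snap
  induction snap with
  | nil => intro h _; exact absurd rfl h
  | cons j rest ih =>
    intro _ hf
    have hj : j ∈ rem := by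
      by_contra hc
      rw [fI_cons_notmem rem rest hc] at hf
      simp at hf
    have hfrest : fI rem rest = [] := by rwa [fI_cons_mem rem rest hj] at hf
    cases rest with
    | nil => exact ⟨j, hj, pruneItems_cons_esc [] [j] hj (by simp)⟩
    | cons z zs =>
      obtain ⟨x, hx, heq⟩ := ih (by simp) hfrest
      refine ⟨x, hx, ?_⟩
      rw [pruneItems_cons_mem (z :: zs) (j :: z :: zs) hj
        (by intro h1; rw [List.length_cons, List.length_cons] at h1; omega),
        List.erase_cons_head]
      exact heq

theorem pruneItems_keep (rem : List Int) : ∀ (snap pre : List Int),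
    (∀ x ∈ pre, x ∉ rem) →
    ¬(pre = [] ∧ snap ≠ [] ∧ fI rem snap = []) →
    pruneItems rem snap (pre ++ snap) = (pre ++ fI rem snap, false) := by
  intro snap
  induction snap with
  | nil => intro pre _ _; simp [pruneItems, fI]
  | cons j rest ih =>
    intro pre hpre hcond
    by_cases hj : j ∈ rem
    · have hjp : j ∉ pre := fun hm => hpre j hm hj
      by_cases hsm : pre = [] ∧ rest = []
      · exact absurd ⟨hsm.1, by simp, by rw [fI_cons_mem rem rest hj, hsm.2, fI_nil]⟩ hcond
      · have hlen : (pre ++ j :: rest).length ≠ 1 := by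
          rcases not_and_or.mp hsm with hcase | hcase
          · have hp : pre.length ≠ 0 := fun hz => hcase (List.length_eq_zero_iff.mp hz)
            simp only [List.length_append, List.length_cons]
            omega
          · have hr : rest.length ≠ 0 := fun hz => hcase (List.length_eq_zero_iff.mp hz)
            simp only [List.length_append, List.length_cons]
            omega
        rw [pruneItems_cons_mem rest (pre ++ j :: rest) hj hlen,
          List.erase_append_right _ hjp, List.erase_cons_head]
        have hcond' : ¬(pre = [] ∧ rest ≠ [] ∧ fI rem rest = []) := by
          rintro ⟨h1, _, h3⟩
          exact hcond ⟨h1, by simp, by rw [fI_cons_mem rem rest hj]; exact h3⟩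
        rw [ih pre hpre hcond', fI_cons_mem rem rest hj]
    · rw [pruneItems_cons_notmem rest (pre ++ j :: rest) hj]
      have hsplit : pre ++ j :: rest = (pre ++ [j]) ++ rest := by simp
      have hpre' : ∀ x ∈ pre ++ [j], x ∉ rem := by
        intro x hx
        rcases List.mem_append.mp hx with h | h
        · exact hpre x h
        · rw [List.mem_singleton] at h; subst h; exact hj
      rw [hsplit, ih (pre ++ [j]) hpre' (by simp), fI_cons_notmem rem rest hj]
      simp

theorem pruneSeq_spec (rem : List Int) (item : Int) (hitem : item ∉ rem) :
    ∀ (snap pre : List (List Int)),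
    (∀ its ∈ pre, fI rem its = its ∧ its ≠ []) →
    (∀ its ∈ snap, its ≠ []) →
    (pre ≠ [] ∨ ∃ its ∈ snap, item ∈ its) →
    pruneSeq rem snap (pre ++ snap) = (pre ++ gS rem snap, false) := by
  intro snap
  induction snap with
  | nil => intro pre _ _ _; simp [pruneSeq, gS]
  | cons its rest ih =>
    intro pre hpre hsnap hne
    have hits : its ≠ [] := hsnap its List.mem_cons_self
    by_cases hf : fI rem its = []
    · obtain ⟨x, hxr, hesc⟩ := pruneItems_esc rem its hits hf
      have hnotin : item ∉ its := fun hmem => hitem (fI_eq_nil_mem hf item hmem)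
      have hitspre : its ∉ pre := fun h => hits ((hpre its h).1.symm.trans hf)
      have hrepl : (pre ++ its :: rest).replace its [x] = pre ++ [x] :: rest :=
        replace_append_of_not_mem pre rest its [x] hitspre
      have hxpre : [x] ∉ pre := by
        intro h
        have h1 := (hpre [x] h).1
        rw [fI_cons_mem rem [] hxr, fI_nil] at h1
        exact List.cons_ne_nil x [] h1.symm
      by_cases hsm : pre = [] ∧ rest = []
      · exfalso
        rcases hne with hp | ⟨its0, hm, hin⟩
        · exact hp hsm.1
        · rcases List.mem_cons.mp hm with rfl | hm'
          · exact hnotin hin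
          · rw [hsm.2] at hm'; simp at hm'
      · have hlen : (pre ++ its :: rest).length ≠ 1 := by
          rcases not_and_or.mp hsm with hcase | hcase
          · have hp : pre.length ≠ 0 := fun hz => hcase (List.length_eq_zero_iff.mp hz)
            simp only [List.length_append, List.length_cons]
            omega
          · have hr : rest.length ≠ 0 := fun hz => hcase (List.length_eq_zero_iff.mp hz)
            simp only [List.length_append, List.length_cons]
            omega
        rw [pruneSeq_cons_esc rest (pre ++ its :: rest) hesc hlen, hrepl,
          List.erase_append_right _ hxpre, List.erase_cons_head]
        have hne' : pre ≠ [] ∨ ∃ its0 ∈ rest, item ∈ its0 := by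
          rcases hne with hp | ⟨its0, hm, hin⟩
          · exact Or.inl hp
          · rcases List.mem_cons.mp hm with rfl | hm'
            · exact absurd hin hnotin
            · exact Or.inr ⟨its0, hm', hin⟩
        rw [ih pre hpre (fun i hi => hsnap i (List.mem_cons_of_mem _ hi)) hne',
          gS_cons_drop rem rest hf]
    · have hkeep : pruneItems rem its its = (fI rem its, false) := by
        have hk := pruneItems_keep rem its [] (by simp) (by rintro ⟨_, _, h3⟩; exact hf h3)
        simpa using hk
      have hrepl : (pre ++ its :: rest).replace its (fI rem its)
          = pre ++ (fI rem its) :: rest := by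
        by_cases heq : fI rem its = its
        · rw [heq, replace_self]
        · exact replace_append_of_not_mem pre rest its _ (fun h => heq ((hpre its h).1))
      rw [pruneSeq_cons_keep rest (pre ++ its :: rest) hkeep, hrepl]
      have hpre' : ∀ p ∈ pre ++ [fI rem its], fI rem p = p ∧ p ≠ [] := by
        intro p hp
        rcases List.mem_append.mp hp with h | h
        · exact hpre p h
        · rw [List.mem_singleton] at h; subst h
          exact ⟨fI_idem rem its, hf⟩
      have hsplit : pre ++ (fI rem its) :: rest = (pre ++ [fI rem its]) ++ rest := by simp
      rw [hsplit, ih (pre ++ [fI rem its]) hpre'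
        (fun i hi => hsnap i (List.mem_cons_of_mem _ hi)) (Or.inl (by simp)),
        gS_cons_keep rem rest hf]
      simp

theorem pruneCs_spec (rem : List Int) (item : Int) (hitem : item ∉ rem) :
    ∀ (snap pre : List (List (List Int))),
    (∀ s ∈ pre, gS rem s = s) →
    (∀ s ∈ snap, (∀ its ∈ s, its ≠ []) ∧ ∃ its ∈ s, item ∈ its) →
    pruneCs rem snap (pre ++ snap) = pre ++ snap.map (gS rem) := by
  intro snap
  induction snap with
  | nil => intro pre _ _; simp [pruneCs]
  | cons s rest ih =>
    intro pre hpre hsnap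
    obtain ⟨hne_s, hex⟩ := hsnap s List.mem_cons_self
    have hps : pruneSeq rem s s = (gS rem s, false) := by
      have hk := pruneSeq_spec rem item hitem s [] (by simp) hne_s (Or.inr hex)
      simpa using hk
    rw [pruneCs_cons_keep rest (pre ++ s :: rest) hps]
    have hrepl : (pre ++ s :: rest).replace s (gS rem s) = pre ++ (gS rem s) :: rest := by
      by_cases heq : gS rem s = s
      · rw [heq, replace_self]
      · exact replace_append_of_not_mem pre rest s _ (fun h => heq (hpre s h))
    have hpre' : ∀ p ∈ pre ++ [gS rem s], gS rem p = p := by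
      intro p hp
      rcases List.mem_append.mp hp with h | h
      · exact hpre p h
      · rw [List.mem_singleton] at h; subst h; exact gS_idem rem s
    have hsplit : pre ++ (gS rem s) :: rest = (pre ++ [gS rem s]) ++ rest := by simp
    rw [hrepl, hsplit, ih (pre ++ [gS rem s]) hpre'
      (fun q hq => hsnap q (List.mem_cons_of_mem _ hq))]
    simp

-- ---- B's two foldl passes build the same map ----

theorem rebuild_inner (rem : List Int) : ∀ (seq : List (List Int)) (acc : List (List Int)),
    seq.foldl (fun acc its =>
      let ni := its.filter (fun x => !(rem.contains x))
      if ni.isEmpty then acc else acc ++ [ni]) acc = acc ++ gS rem seq := by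
  intro seq
  induction seq with
  | nil => intro acc; simp [gS_nil]
  | cons its rest ih =>
    intro acc
    show List.foldl _ (if (fI rem its).isEmpty then acc else acc ++ [fI rem its]) rest
        = acc ++ gS rem (its :: rest)
    by_cases h : fI rem its = []
    · rw [if_pos (List.isEmpty_iff.mpr h), ih acc, gS_cons_drop rem rest h]
    · have h2 : (fI rem its).isEmpty = false := by simpa [List.isEmpty_iff] using h
      rw [h2]
      show List.foldl _ (acc ++ [fI rem its]) rest = _
      rw [ih (acc ++ [fI rem its]), gS_cons_keep rem rest h]
      simp

theorem rebuild_outer (rem : List Int) : ∀ (cand acc : List (List (List Int))),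
    (∀ s ∈ cand, gS rem s ≠ []) →
    cand.foldl (fun res seq =>
      if (gS rem seq).isEmpty then res else res ++ [gS rem seq]) acc
      = acc ++ cand.map (gS rem) := by
  intro cand
  induction cand with
  | nil => intro acc _; simp
  | cons s t ih =>
    intro acc h
    have h2 : (gS rem s).isEmpty = false := by
      simpa [List.isEmpty_iff] using h s List.mem_cons_self
    simp only [List.foldl_cons, h2, Bool.false_eq_true, if_false]
    rw [ih (acc ++ [gS rem s]) (fun q hq => h q (List.mem_cons_of_mem _ hq))]
    simp

theorem rebuildB_eq (rem : List Int) (cand : List (List (List Int)))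
    (h : ∀ s ∈ cand, gS rem s ≠ []) :
    rebuildB rem cand = cand.map (gS rem) := by
  have hfun : (fun (res : List (List (List Int))) (seq : List (List Int)) =>
      let newSeq := seq.foldl (fun acc its =>
        let ni := its.filter (fun x => !(rem.contains x))
        if ni.isEmpty then acc else acc ++ [ni]) []
      if newSeq.isEmpty then res else res ++ [newSeq])
      = (fun res seq => if (gS rem seq).isEmpty then res else res ++ [gS rem seq]) := by
    funext res seq
    have hi := rebuild_inner rem seq []
    simp only [List.nil_append] at hi
    simp only [hi]
  show List.foldl _ [] cand = _
  rw [hfun, rebuild_outer rem cand [] h]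
  simp

-- ===== VERDICT (by name: the statement is the Claim_ definition above) =====
theorem selectSequence_spec : Claim_equal_selectSequence := by
  intro db n item phi hDom hPre
  unfold Spec_selectSequence
  rcases hPre with ⟨hP1, hP2⟩ | hno
  · have hcand : candA db item = candB db item := candA_eq db item
    have hfun : supportCountA db = supportCountB db :=
      funext (fun x => supportCount_eq db hP1 x)
    have hrem : removeA db item phi (candB db item) = removeB db item phi (candB db item) := by
      simp only [removeA, removeB, hfun]
    have hremitem : item ∉ removeB db item phi (candB db item) :=
      removeB_not_mem db item phi (candB db item)
    have hsnap : ∀ s ∈ candB db item,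
        (∀ its ∈ s, its ≠ []) ∧ ∃ its ∈ s, item ∈ its := by
      intro s hs
      obtain ⟨hdb, hpred⟩ := List.mem_filter.mp hs
      obtain ⟨its, hi, hcont⟩ := List.any_eq_true.mp hpred
      have hex : ∃ its ∈ s, item ∈ its := ⟨its, hi, by simpa using hcont⟩
      exact ⟨hP2 s hdb hex, hex⟩
    have hA : selectSequence db n item phi
        = (candB db item).map (gS (removeB db item phi (candB db item))) := by
      show pruneCs (removeA db item phi (candA db item)) (candA db item) (candA db item) = _
      rw [hcand, hrem]
      have hk := pruneCs_spec (removeB db item phi (candB db item)) item hremitem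
        (candB db item) [] (by simp) hsnap
      simpa using hk
    have hB : selectSequence_alt db n item phi
        = (candB db item).map (gS (removeB db item phi (candB db item))) := by
      show rebuildB (removeB db item phi (candB db item)) (candB db item) = _
      exact rebuildB_eq _ _ (fun s hs =>
        gS_ne_nil _ item s hremitem (hsnap s hs).2)
    rw [hA, hB]
  · have hcandB : candB db item = [] := by
      unfold candB
      apply List.filter_eq_nil_iff.mpr
      intro s hs hval
      obtain ⟨its, hi, hc⟩ := List.any_eq_true.mp hval
      exact hno s hs its hi (by simpa using hc)
    have hcandA : candA db item = [] := by rw [candA_eq, hcandB]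
    show pruneCs (removeA db item phi (candA db item)) (candA db item) (candA db item)
        = selectSequence_alt db n item phi
    rw [hcandA]
    show pruneCs _ [] [] = rebuildB (removeB db item phi (candB db item)) (candB db item)
    rw [hcandB]
    rfl
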